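-- pv_equiv track=rewrite | github.com/bigchuck/meal-planner | meal_planner/utils/search.py | _parse_simple
-- ===== SOURCE A (Python) =====
-- from typing import List, Dict, Tuple
--
-- def _parse_simple(tokens: List[str]) -> List[Dict[str, List[str]]]:
--     """
--     Fallback simple parser (original behavior without parentheses).
--     Used if expression parsing fails.
--     """
--     # Split on OR into clauses
--     clauses = []
--     current = {"pos": [], "neg": []}
--     negate_next = False
--     i = 0
--
--     while i < len(tokens):
--         t = tokens[i]
--
--         if t == "OR":
--             # Finish current clause
--             if current["pos"] or current["neg"]:
--                 clauses.append(current)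
--             current = {"pos": [], "neg": []}
--             negate_next = False
--             i += 1
--             continue
--
--         elif t == "AND":
--             # AND is implicit, just skip
--             i += 1
--             continue
--
--         elif t == "NOT":
--             negate_next = True
--             i += 1
--             continue
--
--         elif t in ("(", ")"):
--             # Ignore parentheses in fallback mode
--             i += 1
--             continue
--
--         else:
--             # Regular term
--             if negate_next:
--                 current["neg"].append(t)
--                 negate_next = False
--             else:
--                 current["pos"].append(t)
--             i += 1
--
--     # Don't forget last clause
--     if current["pos"] or current["neg"]:
--         clauses.append(current)
--
--     # If no operators provided, treat as single AND clause
--     if not clauses: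
--         clauses = [{"pos": [], "neg": []}]
--
--     return clauses
-- ===== SOURCE B (Python) =====
-- from typing import List, Dict
--
--
-- def _parse_simple(tokens: List[str]) -> List[Dict[str, List[str]]]:
--     # Split tokens into groups separated by "OR", then map each group to a clause.
--     groups = []
--     g = []
--     for t in tokens:
--         if t == "OR":
--             groups.append(g)
--             g = []
--         else:
--             g.append(t)
--     groups.append(g)
--
--     clauses = []
--     for grp in groups:
--         pos, neg, negate = [], [], False
--         for t in grp:
--             if t in ("AND", "(", ")"):
--                 pass
--             elif t == "NOT":
--                 negate = True
--             elif negate: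
--                 neg.append(t)
--                 negate = False
--             else:
--                 pos.append(t)
--         if pos or neg:
--             clauses.append({"pos": pos, "neg": neg})
--     return clauses if clauses else [{"pos": [], "neg": []}]
-- ===== Notes on version B (the rewrite author's own statement) =====
-- stated objective: alternative
-- what changed: A's single fused while-loop carrying clause state across OR boundaries is replaced by a two-stage decomposition: first split the token list into groups on "OR", then map each group independently to a clause with a local negate flag, keeping the same empty-clause drop and no-clause fallback.
import Mathlib
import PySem

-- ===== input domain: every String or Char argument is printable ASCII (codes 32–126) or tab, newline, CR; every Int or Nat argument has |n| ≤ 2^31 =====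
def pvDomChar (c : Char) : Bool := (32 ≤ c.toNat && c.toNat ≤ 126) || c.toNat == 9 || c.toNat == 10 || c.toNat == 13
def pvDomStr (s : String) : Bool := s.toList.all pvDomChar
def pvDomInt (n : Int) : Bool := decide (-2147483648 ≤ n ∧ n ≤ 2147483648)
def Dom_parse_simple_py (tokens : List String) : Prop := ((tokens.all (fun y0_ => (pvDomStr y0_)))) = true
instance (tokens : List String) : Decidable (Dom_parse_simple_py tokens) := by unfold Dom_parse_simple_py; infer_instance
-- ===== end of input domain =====

-- B splits the tokens on "OR" first, then maps each group to a clause (different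
-- decomposition, same cost); equivalence of return values is proved for all inputs.

-- ===== PORT A =====
-- A's single fused while-loop: state = (clauses, pos, neg, negate_next)
def parseAGo : List String → List (List (String × List String)) → List String → List String → Bool → List (List (String × List String))
  | [], clauses, pos, neg, _ =>
      -- "Don't forget last clause"
      if !pos.isEmpty || !neg.isEmpty then clauses ++ [[("pos", pos), ("neg", neg)]] else clauses
  | t :: rest, clauses, pos, neg, negate =>
      if t = "OR" then
        parseAGo rest (if !pos.isEmpty || !neg.isEmpty then clauses ++ [[("pos", pos), ("neg", neg)]] else clauses) [] [] false
      else if t = "AND" then parseAGo rest clauses pos neg negate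
      else if t = "NOT" then parseAGo rest clauses pos neg true
      else if t = "(" ∨ t = ")" then parseAGo rest clauses pos neg negate
      else if negate then parseAGo rest clauses pos (neg ++ [t]) false
      else parseAGo rest clauses (pos ++ [t]) neg negate

def parse_simple_py (tokens : List String) : List (List (String × List String)) :=
  let clauses := parseAGo tokens [] [] [] false
  if clauses.isEmpty then [[("pos", []), ("neg", [])]] else clauses

-- ===== PORT B =====
-- split loop: state = (groups, current group)
def pvSplitGo : List String → List (List String) → List String → List (List String)
  | [], groups, g => groups ++ [g]
  | t :: rest, groups, g =>
      if t = "OR" then pvSplitGo rest (groups ++ [g]) [] else pvSplitGo rest groups (g ++ [t])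

-- inner for-loop over one group: state = (pos, neg, negate)
def pvIStep (st : List String × List String × Bool) (t : String) : List String × List String × Bool :=
  if t = "AND" ∨ t = "(" ∨ t = ")" then st
  else if t = "NOT" then (st.1, st.2.1, true)
  else if st.2.2 then (st.1, st.2.1 ++ [t], false)
  else (st.1 ++ [t], st.2.1, st.2.2)

-- outer for-loop over groups
def pvStep (acc : List (List (String × List String))) (grp : List String) : List (List (String × List String)) :=
  let st := grp.foldl pvIStep ([], [], false)
  if !st.1.isEmpty || !st.2.1.isEmpty then acc ++ [[("pos", st.1), ("neg", st.2.1)]] else acc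

def parse_simple_py_alt (tokens : List String) : List (List (String × List String)) :=
  let groups := pvSplitGo tokens [] []
  let clauses := groups.foldl pvStep []
  if clauses.isEmpty then [[("pos", []), ("neg", [])]] else clauses

-- ===== PRECONDITION & SPEC =====
def Spec_parse_simple_py (tokens : List String) (out : List (List (String × List String))) : Prop := out = parse_simple_py_alt tokens
instance (tokens : List String) (out : List (List (String × List String))) : Decidable (Spec_parse_simple_py tokens out) := by unfold Spec_parse_simple_py; infer_instance

-- ===== CLAIM (what is proved, stated in full; the proofs are below) =====
def Claim_equal_parse_simple_py : Prop := ∀ (tokens : List String), Dom_parse_simple_py tokens → Spec_parse_simple_py tokens (parse_simple_py tokens)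

-- ===== LEMMAS AND PROOFS =====

theorem pvSplitGo_append : ∀ (r : List String) (groups : List (List String)) (g : List String),
    pvSplitGo r groups g = groups ++ pvSplitGo r [] g := by
  intro r
  induction r with
  | nil => intro groups g; simp [pvSplitGo]
  | cons t rest ih =>
    intro groups g
    by_cases h : t = "OR"
    · simp only [pvSplitGo, if_pos h, List.nil_append]
      rw [ih (groups ++ [g]) [], ih [g] []]
      simp
    · simp only [pvSplitGo, if_neg h, List.nil_append]
      rw [ih groups (g ++ [t]), ih [] (g ++ [t])]

-- key invariant: A's fused loop equals B's split-then-map, with A's running clause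
-- state equal to the inner loop run on the currently accumulated group g.
theorem pvKey : ∀ (tokens g : List String) (clauses : List (List (String × List String))),
    parseAGo tokens clauses (List.foldl pvIStep ([], [], false) g).1
      (List.foldl pvIStep ([], [], false) g).2.1 (List.foldl pvIStep ([], [], false) g).2.2
      = List.foldl pvStep clauses (pvSplitGo tokens [] g) := by
  intro tokens
  induction tokens with
  | nil =>
    intro g clauses
    simp [parseAGo, pvSplitGo, pvStep]
  | cons t rest ih =>
    intro g clauses
    by_cases hOR : t = "OR"
    · subst hOR
      simp only [parseAGo, pvSplitGo, List.nil_append, if_true]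
      rw [pvSplitGo_append rest [g] [], List.foldl_append]
      have h0 := ih [] (pvStep clauses g)
      simp only [List.foldl] at h0 ⊢
      rw [← h0]
      simp [pvStep]
    · have hsplit : pvSplitGo (t :: rest) [] g = pvSplitGo rest [] (g ++ [t]) := by
        simp [pvSplitGo, hOR]
      rw [hsplit, ← ih (g ++ [t]) clauses]
      rw [List.foldl_append]
      simp only [List.foldl]
      by_cases hAND : t = "AND"
      · simp [parseAGo, pvIStep, hAND]
      · by_cases hNOT : t = "NOT"
        · simp [parseAGo, pvIStep, hNOT]
        · by_cases hP : t = "(" ∨ t = ")"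
          · simp only [parseAGo, pvIStep, if_neg hOR, if_neg hAND, if_neg hNOT, if_pos hP]
            simp [hAND, hP]
          · by_cases hneg : (List.foldl pvIStep ([], [], false) g).2.2
            · simp [parseAGo, pvIStep, hOR, hAND, hNOT, hP, hneg]
            · simp [parseAGo, pvIStep, hOR, hAND, hNOT, hP, hneg]

-- ===== VERDICT (by name: the statement is the Claim_ definition above) =====
theorem parse_simple_py_spec : Claim_equal_parse_simple_py := by
  intro tokens _
  unfold Spec_parse_simple_py parse_simple_py parse_simple_py_alt
  have h := pvKey tokens [] []
  simp only [List.foldl] at h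
  rw [h]
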